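-- pv_equiv track=rewrite | github.com/mariyahendriksen/evaluating-cmr-in-vl | src/perturbations/perturbation_types/ARO.py | get_trigrams
-- ===== SOURCE A (Python) =====
-- def get_trigrams(sentence):
--     # Taken from https://github.com/lingo-mit/context-ablations/blob/478fb18a9f9680321f0d37dc999ea444e9287cc0/code/transformers/src/transformers/data/data_augmentation.py
--     trigrams = []
--     trigram = []
--     for i in range(len(sentence)):
--         trigram.append(sentence[i])
--         if i % 3 == 2:
--             trigrams.append(trigram[:])
--             trigram = []
--     if trigram:
--         trigrams.append(trigram)
--     return trigrams
-- ===== SOURCE B (Python) =====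
-- def get_trigrams(sentence):
--     # Slice-based chunking: one slice of three per chunk, no element-wise buffer.
--     return [list(sentence[i:i + 3]) for i in range(0, len(sentence), 3)]
-- ===== Notes on version B (the rewrite author's own statement) =====
-- stated objective: idiomatic
-- what changed: Replaced the per-element loop with an index-mod-3 counter and an explicit trigram buffer by a slice-based comprehension over range(0, len, 3) that takes one three-element slice per chunk.
import Mathlib
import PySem

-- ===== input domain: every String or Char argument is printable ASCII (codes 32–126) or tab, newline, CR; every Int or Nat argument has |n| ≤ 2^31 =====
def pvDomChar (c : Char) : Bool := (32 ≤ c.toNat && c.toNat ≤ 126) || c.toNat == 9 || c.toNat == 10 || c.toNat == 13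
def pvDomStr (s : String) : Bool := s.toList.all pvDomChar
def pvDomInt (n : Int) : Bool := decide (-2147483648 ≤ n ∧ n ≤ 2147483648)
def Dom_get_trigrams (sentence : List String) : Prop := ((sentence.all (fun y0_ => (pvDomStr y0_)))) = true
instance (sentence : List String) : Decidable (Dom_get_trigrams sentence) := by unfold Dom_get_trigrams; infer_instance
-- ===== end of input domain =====

-- B replaces A's per-element loop with a mod-3 counter and buffer by a slice-based comprehension over range(0, len, 3) (idiomatic; same cost).

-- ===== PORT A =====
def get_trigrams (sentence : List String) : List (List String) :=
  let st := (PySem.List.pyRange 0 (PySem.List.len sentence) 1).foldl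
    (fun (st : List (List String) × List String) (i : Int) =>
      let trigram := st.2 ++ [PySem.List.pyGetD sentence i ""]
      if PySem.Int.mod i 3 = 2 then (st.1 ++ [trigram], []) else (st.1, trigram))
    ([], [])
  if st.2 ≠ [] then st.1 ++ [st.2] else st.1

-- ===== PORT B =====
def get_trigrams_alt (sentence : List String) : List (List String) :=
  (PySem.List.pyRange 0 (PySem.List.len sentence) 3).map
    (fun i => PySem.List.slice sentence (some i) (some (i + 3)))

-- ===== PRECONDITION & SPEC =====
def Spec_get_trigrams (sentence : List String) (out : List (List String)) : Prop := out = get_trigrams_alt sentence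
instance (sentence : List String) (out : List (List String)) : Decidable (Spec_get_trigrams sentence out) := by unfold Spec_get_trigrams; infer_instance

-- ===== CLAIM (what is proved, stated in full; the proofs are below) =====
def Claim_equal_get_trigrams : Prop := ∀ (sentence : List String), Dom_get_trigrams sentence → Spec_get_trigrams sentence (get_trigrams sentence)

-- ===== LEMMAS AND PROOFS =====

-- Proof-side chunking function: both ports are shown equal to it.
def pvChunk : List String → List (List String)
  | [] => []
  | x :: xs => ((x :: xs).take 3) :: pvChunk (xs.drop 2)
termination_by l => l.length
decreasing_by simp

-- A's loop step, over (index, element) pairs.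
def pvStep (st : List (List String) × List String) (p : Int × String) :
    List (List String) × List String :=
  let trigram := st.2 ++ [p.2]
  if PySem.Int.mod p.1 3 = 2 then (st.1 ++ [trigram], []) else (st.1, trigram)

lemma chunk_small (buf : List String) (h : buf.length ≤ 2) :
    pvChunk buf = if buf = [] then [] else [buf] := by
  match buf, h with
  | [], _ => simp [pvChunk]
  | [a], _ => simp [pvChunk]
  | [a, b], _ => simp [pvChunk]

lemma chunk_three_shape (x : String) (xs : List String) :
    pvChunk (x :: xs) = ((x :: xs).take 3) :: pvChunk (xs.drop 2) := by
  rw [pvChunk.eq_def]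

lemma chunk_three (a b c : String) (rest : List String) :
    pvChunk (a :: b :: c :: rest) = [a, b, c] :: pvChunk rest := by
  rw [chunk_three_shape]
  simp

-- Loop invariant: the buffer length tracks the running index mod 3.
lemma loop_inv (l : List String) :
    ∀ (s : Int) (acc : List (List String)) (buf : List String),
      0 ≤ s → (buf.length : Int) = s % 3 →
      (if ((PySem.List.enumerate l s).foldl pvStep (acc, buf)).2 ≠ [] then
         ((PySem.List.enumerate l s).foldl pvStep (acc, buf)).1 ++
           [((PySem.List.enumerate l s).foldl pvStep (acc, buf)).2]
       else ((PySem.List.enumerate l s).foldl pvStep (acc, buf)).1)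
        = acc ++ pvChunk (buf ++ l) := by
  induction l with
  | nil =>
    intro s acc buf hs hbuf
    simp only [PySem.List.enumerate_nil, List.foldl_nil, List.append_nil]
    rw [chunk_small buf (by omega)]
    by_cases h : buf = [] <;> simp [h]
  | cons a rest ih =>
    intro s acc buf hs hbuf
    simp only [PySem.List.enumerate_cons, List.foldl_cons]
    have hm : PySem.Int.mod s 3 = s % 3 := by
      rw [PySem.Int.mod, Int.fmod_eq_emod]
      simp
    by_cases h2 : s % 3 = 2
    · -- buffer fills up: flush
      obtain ⟨x, y, rfl⟩ : ∃ x y, buf = [x, y] := by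
        match buf, (by omega : buf.length = 2) with
        | [x, y], _ => exact ⟨x, y, rfl⟩
      have hstep : pvStep (acc, [x, y]) (s, a) = (acc ++ [[x, y, a]], []) := by
        simp only [pvStep, if_pos (show PySem.Int.mod s 3 = 2 from by rw [hm]; exact h2)]
        simp
      rw [hstep, ih (s + 1) (acc ++ [[x, y, a]]) [] (by omega) (by simp; omega)]
      simp [chunk_three]
    · -- buffer grows
      have hstep : pvStep (acc, buf) (s, a) = (acc, buf ++ [a]) := by
        simp only [pvStep, if_neg (show ¬ PySem.Int.mod s 3 = 2 from by rw [hm]; exact h2)]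
      rw [hstep, ih (s + 1) acc (buf ++ [a]) (by omega) (by simp; omega)]
      simp

-- B's comprehension over range(0, len, 3), re-indexed over List.range, equals pvChunk.
lemma range_map_eq_chunk (l : List String) :
    ∀ (m : Nat), m = (l.length + 2) / 3 →
      (List.range m).map (fun k => (l.drop (3 * k)).take 3) = pvChunk l := by
  induction l using pvChunk.induct with
  | case1 =>
    intro m hm
    simp only [List.length_nil, Nat.zero_add] at hm
    subst hm
    simp [pvChunk]
  | case2 x xs ih =>
    intro m hm
    have hm' : m = ((xs.drop 2).length + 2) / 3 + 1 := by
      simp [hm]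
      omega
    subst hm'
    rw [List.range_succ_eq_map]
    simp only [List.map_cons, List.map_map]
    rw [chunk_three_shape]
    congr 1
    rw [← ih ((xs.length - 2 + 2) / 3) (by simp)]
    simp only [List.length_drop]
    apply List.map_congr_left
    intro k _
    simp only [Function.comp_apply, List.drop_drop]
    rw [show 3 * Nat.succ k = (3 * k + 2) + 1 by omega, List.drop_succ_cons]
    congr 2
    omega

theorem alt_eq_chunk (l : List String) : get_trigrams_alt l = pvChunk l := by
  unfold get_trigrams_alt
  rw [PySem.List.pyRange_of_pos 0 (PySem.List.len l) (by norm_num)]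
  rw [List.map_map]
  have hcount :
      (if (0 : Int) < PySem.List.len l then
        (((PySem.List.len l) - 0 + 3 - 1) / 3).toNat else 0) = (l.length + 2) / 3 := by
    simp [PySem.List.len]
    split_ifs with h
    · omega
    · omega
  rw [hcount, ← range_map_eq_chunk l _ rfl]
  apply List.map_congr_left
  intro k _
  have h3k : (0 : Int) + 3 * (k : Int) = ((3 * k : Nat) : Int) := by push_cast; ring
  have h3k3 : (0 : Int) + 3 * (k : Int) + 3 = ((3 * k + 3 : Nat) : Int) := by push_cast; ring
  simp only [Function.comp]
  rw [h3k3, h3k, PySem.List.slice_natCast]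
  congr 1
  omega
-- ===== VERDICT (by name: the statement is the Claim_ definition above) =====
theorem get_trigrams_spec : Claim_equal_get_trigrams := by
  intro sentence _
  unfold Spec_get_trigrams get_trigrams
  have hfold :
      (PySem.List.pyRange 0 (PySem.List.len sentence) 1).foldl
        (fun (st : List (List String) × List String) (i : Int) =>
          let trigram := st.2 ++ [PySem.List.pyGetD sentence i ""]
          if PySem.Int.mod i 3 = 2 then (st.1 ++ [trigram], []) else (st.1, trigram))
        ([], [])
      = (PySem.List.enumerate sentence (0 : Int)).foldl pvStep ([], []) := by
    rw [PySem.List.enumerate_eq_map_pyRange (d := ""), List.foldl_map]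
    rfl
  simp only [hfold]
  have h := loop_inv sentence 0 [] [] (by norm_num) (by simp)
  rw [List.nil_append, List.nil_append] at h
  exact h.trans (alt_eq_chunk sentence).symm
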